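-- pv_equiv track=rewrite | github.com/CorylLtd/Advent2024 | Puzzle09/solution.py | get_space_index
-- ===== SOURCE A (Python) =====
-- def get_space_index(fm, space_size):
--     for index in range(len(fm) - space_size + 1):
--         if fm[index] == -1:
--             found = True
--             for j in range(1, space_size):
--                 if fm[index + j] != -1:
--                     found = False
--
--             if found:
--                 return index
--     return -1
-- ===== SOURCE B (Python) =====
-- def get_space_index(fm, space_size):
--     n = len(fm)
--     i = 0
--     while True:
--         try:
--             start = fm.index(-1, i)
--         except ValueError:
--             return -1
--         end = start
--         while end < n and fm[end] == -1:
--             end += 1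
--         if end - start >= space_size:
--             return start
--         i = end + 1
-- ===== Notes on version B (the rewrite author's own statement) =====
-- stated objective: alternative
-- what changed: Instead of testing a window of space_size cells at every candidate index, B jumps straight to the next -1 with list.index, measures that run of -1s once, returns its start if long enough, and otherwise skips past the whole run.
-- outside the precondition, e.g. on get_space_index([-1], 0): A returns 0, B returns 0; on get_space_index([5, -1], -1): A returns 1, B returns 1
import Mathlib
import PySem

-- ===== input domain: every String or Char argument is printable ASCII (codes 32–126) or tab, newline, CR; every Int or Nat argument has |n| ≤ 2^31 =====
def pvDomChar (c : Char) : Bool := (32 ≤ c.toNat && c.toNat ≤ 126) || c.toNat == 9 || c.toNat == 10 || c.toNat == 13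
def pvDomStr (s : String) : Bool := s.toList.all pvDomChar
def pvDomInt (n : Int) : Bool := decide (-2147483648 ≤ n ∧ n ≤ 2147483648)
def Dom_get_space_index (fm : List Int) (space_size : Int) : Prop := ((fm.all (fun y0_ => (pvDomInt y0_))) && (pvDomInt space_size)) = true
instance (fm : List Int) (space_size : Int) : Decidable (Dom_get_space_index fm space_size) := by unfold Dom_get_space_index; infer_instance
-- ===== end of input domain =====

-- B jumps to the next -1 with list.index, measures that run of -1s once and skips past it, instead of A's per-candidate window re-scan (alternative algorithm; not measurably faster on the timing inputs).

-- ===== PORT A =====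
-- inner 'for j in range(1, space_size)' loop: found starts True, set False on any mismatch
def pvFoundA (fm : List Int) (space_size : Int) (index : Int) : Bool :=
  (PySem.List.pyRange 1 space_size 1).foldl
    (fun found j => if PySem.List.pyGetD fm (index + j) 0 ≠ -1 then false else found) true

-- outer 'for index in range(len(fm) - space_size + 1)' loop with early return
def pvLoopA (fm : List Int) (space_size : Int) : List Int → Int
  | [] => -1
  | index :: rest =>
    if PySem.List.pyGetD fm index 0 = -1 then
      if pvFoundA fm space_size index then index else pvLoopA fm space_size rest
    else pvLoopA fm space_size rest

def get_space_index (fm : List Int) (space_size : Int) : Int :=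
  pvLoopA fm space_size (PySem.List.pyRange 0 ((fm.length : Int) - space_size + 1) 1)

-- ===== PORT B =====
-- fm.index(-1, i): first index ≥ i holding -1 (none = ValueError); hand port, exact scan
def pvFindNeg (fm : List Int) (i : Nat) : Option Nat :=
  if _h : i < fm.length then
    (if fm.getD i 0 = -1 then some i else pvFindNeg fm (i + 1))
  else none
termination_by fm.length - i

-- 'end = start; while end < n and fm[end] == -1: end += 1'
def pvRunEnd (fm : List Int) (e : Nat) : Nat :=
  if _h : e < fm.length then
    (if fm.getD e 0 = -1 then pvRunEnd fm (e + 1) else e)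
  else e
termination_by fm.length - e

-- facts the outer while-loop needs for termination
lemma pvFindNeg_bounds (fm : List Int) :
    ∀ (fuel i s : Nat), fm.length - i ≤ fuel → pvFindNeg fm i = some s → i ≤ s ∧ s < fm.length := by
  intro fuel
  induction fuel with
  | zero =>
    intro i s hfu h
    rw [pvFindNeg, dif_neg (by omega)] at h
    simp at h
  | succ fuel ih =>
    intro i s hfu h
    by_cases hi : i < fm.length
    · rw [pvFindNeg, dif_pos hi] at h
      by_cases hv : fm.getD i 0 = -1
      · rw [if_pos hv] at h
        injection h with h'
        subst h'
        exact ⟨le_rfl, hi⟩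
      · rw [if_neg hv] at h
        have := ih (i + 1) s (by omega) h
        exact ⟨by omega, this.2⟩
    · rw [pvFindNeg, dif_neg hi] at h
      simp at h

lemma pvRunEnd_ge (fm : List Int) :
    ∀ (fuel e : Nat), fm.length - e ≤ fuel → e ≤ pvRunEnd fm e := by
  intro fuel
  induction fuel with
  | zero => intro e hfu; rw [pvRunEnd, dif_neg (by omega)]
  | succ fuel ih =>
    intro e hfu
    rw [pvRunEnd]
    by_cases he : e < fm.length
    · rw [dif_pos he]
      by_cases hv : fm.getD e 0 = -1
      · rw [if_pos hv]
        have := ih (e + 1) (by omega)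
        omega
      · rw [if_neg hv]
    · rw [dif_neg he]

-- 'while True:' outer loop; each pass continues from one past the run it examined
def pvLoopB (fm : List Int) (ss : Int) (i : Nat) : Int :=
  match hfn : pvFindNeg fm i with
  | none => -1
  | some start =>
    let e := pvRunEnd fm start
    if (e : Int) - (start : Int) ≥ ss then (start : Int) else pvLoopB fm ss (e + 1)
termination_by fm.length + 1 - i
decreasing_by
  have h1 := pvFindNeg_bounds fm (fm.length - i) i start (by omega) hfn
  have h2 := pvRunEnd_ge fm (fm.length - start) start (by omega)
  omega

def get_space_index_alt (fm : List Int) (space_size : Int) : Int :=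
  pvLoopB fm space_size 0

-- ===== PRECONDITION & SPEC =====
-- The function's natural domain is a positive space size; for space_size ≤ 0 A either raises
-- IndexError (no -1 in fm) or returns a value of its degenerate loop bounds, so those inputs are excluded.
def Pre_get_space_index (fm : List Int) (space_size : Int) : Prop := 1 ≤ space_size
instance (fm : List Int) (space_size : Int) : Decidable (Pre_get_space_index fm space_size) := by unfold Pre_get_space_index; infer_instance

def pvWitness_get_space_index : List Int × Int := ([0, -1, -1, 5], 2)

def Spec_get_space_index (fm : List Int) (space_size : Int) (out : Int) : Prop := out = get_space_index_alt fm space_size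
instance (fm : List Int) (space_size : Int) (out : Int) : Decidable (Spec_get_space_index fm space_size out) := by unfold Spec_get_space_index; infer_instance

-- ===== CLAIM (what is proved, stated in full; the proofs are below) =====
def Claim_equal_get_space_index : Prop := ∀ (fm : List Int) (space_size : Int), Dom_get_space_index fm space_size → Pre_get_space_index fm space_size → Spec_get_space_index fm space_size (get_space_index fm space_size)

-- ===== LEMMAS AND PROOFS =====

-- window predicate: k consecutive -1 cells starting at s
abbrev pvW (fm : List Int) (k s : Nat) : Prop :=
  s + k ≤ fm.length ∧ ∀ j < k, fm.getD (s + j) 0 = -1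

-- first s ≥ a with pvW fm k s, else -1 (reference spec both ports are reduced to)
def pvFindW (fm : List Int) (k : Nat) (a : Nat) : Int :=
  if h : a + k ≤ fm.length then
    (if pvW fm k a then (a : Int) else pvFindW fm k (a + 1))
  else -1
termination_by fm.length + 1 - a
decreasing_by omega

lemma pvFindW_of_W {fm : List Int} {k a : Nat} (h : pvW fm k a) : pvFindW fm k a = (a : Int) := by
  rw [pvFindW]; rw [dif_pos h.1, if_pos h]

lemma pvFindW_succ_of_not {fm : List Int} {k a : Nat} (h : ¬ pvW fm k a) :
    pvFindW fm k a = pvFindW fm k (a + 1) := by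
  rw [pvFindW]
  by_cases hb : a + k ≤ fm.length
  · rw [dif_pos hb, if_neg h]
  · rw [dif_neg hb, pvFindW, dif_neg (by omega)]

lemma pvFindW_congr {fm : List Int} {k : Nat} {a b : Nat} (hab : a ≤ b)
    (h : ∀ s, a ≤ s → s < b → ¬ pvW fm k s) : pvFindW fm k a = pvFindW fm k b := by
  induction b, hab using Nat.le_induction with
  | base => rfl
  | succ b hb ih =>
    rw [ih (fun s hs1 hs2 => h s hs1 (by omega)), pvFindW_succ_of_not (h b hb (by omega))]

lemma pvFindW_eq_neg_one {fm : List Int} {k : Nat} :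
    ∀ (fuel a : Nat), fm.length + 1 - a ≤ fuel → (∀ s, a ≤ s → ¬ pvW fm k s) → pvFindW fm k a = -1 := by
  intro fuel
  induction fuel with
  | zero =>
    intro a ha h
    rw [pvFindW, dif_neg (by omega)]
  | succ fuel ih =>
    intro a ha h
    by_cases hb : a + k ≤ fm.length
    · rw [pvFindW, dif_pos hb, if_neg (h a le_rfl)]
      exact ih (a + 1) (by omega) (fun s hs => h s (by omega))
    · rw [pvFindW, dif_neg hb]

-- A's inner fold computes 'all elements of the range satisfy fm[index+j] = -1'
lemma pvFold_all (p : Int → Prop) [DecidablePred p] :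
    ∀ (l : List Int) (init : Bool),
      l.foldl (fun found j => if p j then false else found) init
        = (init && l.all (fun j => decide (¬ p j))) := by
  intro l
  induction l with
  | nil => intro init; simp
  | cons x xs ih =>
    intro init
    simp only [List.foldl_cons, List.all_cons, ih]
    by_cases hx : p x <;> simp [hx]

lemma pvFoundA_iff {fm : List Int} {ss : Int} (hss : 1 ≤ ss) (a : Nat) :
    pvFoundA fm ss (a : Int) = true ↔ ∀ t : Nat, 1 ≤ t → t < ss.toNat → fm.getD (a + t) 0 = -1 := by
  unfold pvFoundA
  rw [pvFold_all (fun j => PySem.List.pyGetD fm ((a : Int) + j) 0 ≠ -1)]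
  simp only [Bool.true_and, List.all_eq_true]
  constructor
  · intro h t ht1 ht2
    have hmem : (t : Int) ∈ PySem.List.pyRange 1 ss 1 := by
      rw [PySem.List.mem_pyRange_one]
      constructor
      · exact_mod_cast ht1
      · omega
    have := h _ hmem
    simp only [decide_eq_true_eq, not_not] at this
    have : PySem.List.pyGetD fm ((a : Int) + (t : Int)) 0 = -1 := this
    rwa [show ((a : Int) + (t : Int)) = ((a + t : Nat) : Int) by push_cast; ring,
      PySem.List.pyGetD_natCast] at this
  · intro h j hj
    rw [PySem.List.mem_pyRange_one] at hj
    obtain ⟨hj1, hj2⟩ := hj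
    simp only [decide_eq_true_eq, not_not]
    have hjn : j = ((j.toNat : Nat) : Int) := by omega
    rw [hjn, show ((a : Int) + (j.toNat : Int)) = ((a + j.toNat : Nat) : Int) by push_cast; ring,
      PySem.List.pyGetD_natCast]
    exact h j.toNat (by omega) (by omega)

lemma pvCheckA_iff {fm : List Int} {ss : Int} (hss : 1 ≤ ss) (a : Nat)
    (hb : a + ss.toNat ≤ fm.length) :
    (PySem.List.pyGetD fm (a : Int) 0 = -1 ∧ pvFoundA fm ss (a : Int) = true) ↔ pvW fm ss.toNat a := by
  rw [pvFoundA_iff hss a, PySem.List.pyGetD_natCast]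
  constructor
  · rintro ⟨h0, hrest⟩
    refine ⟨hb, fun j hj => ?_⟩
    rcases Nat.eq_zero_or_pos j with hj0 | hj1
    · subst hj0; simpa using h0
    · exact hrest j hj1 hj
  · rintro ⟨_, hall⟩
    exact ⟨by simpa using hall 0 (by omega), fun t ht1 ht2 => hall t ht2⟩

lemma pvLoopA_spec (fm : List Int) (ss : Int) (hss : 1 ≤ ss) :
    ∀ (fuel : Nat) (a : Nat), fm.length + 1 - a ≤ fuel →
      pvLoopA fm ss (PySem.List.pyRange (a : Int) ((fm.length : Int) - ss + 1) 1)
        = pvFindW fm ss.toNat a := by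
  intro fuel
  induction fuel with
  | zero =>
    intro a ha
    have hssn : (ss.toNat : Int) = ss := Int.toNat_of_nonneg (by omega)
    rw [PySem.List.pyRange_one_eq_nil (by omega), pvLoopA, pvFindW, dif_neg (by omega)]
  | succ fuel ih =>
    intro a ha
    have hssn : (ss.toNat : Int) = ss := Int.toNat_of_nonneg (by omega)
    by_cases hb : a + ss.toNat ≤ fm.length
    · have hlt : (a : Int) < (fm.length : Int) - ss + 1 := by omega
      rw [PySem.List.pyRange_one_cons hlt]
      have hrec : pvLoopA fm ss (PySem.List.pyRange ((a : Int) + 1) ((fm.length : Int) - ss + 1) 1)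
          = pvFindW fm ss.toNat (a + 1) := by
        have := ih (a + 1) (by omega)
        rwa [show (((a + 1 : Nat)) : Int) = (a : Int) + 1 by push_cast; ring] at this
      rw [pvLoopA]
      rw [pvFindW, dif_pos hb]
      by_cases hW : pvW fm ss.toNat a
      · have hc := (pvCheckA_iff hss a hb).2 hW
        rw [if_pos hc.1, if_pos hc.2, if_pos hW]
      · rw [if_neg hW]
        by_cases h0 : PySem.List.pyGetD fm (a : Int) 0 = -1
        · have : ¬ (pvFoundA fm ss (a : Int) = true) := fun hf => hW ((pvCheckA_iff hss a hb).1 ⟨h0, hf⟩)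
          rw [if_pos h0, if_neg this, hrec]
        · rw [if_neg h0, hrec]
    · have hnil : PySem.List.pyRange (a : Int) ((fm.length : Int) - ss + 1) 1 = [] :=
        PySem.List.pyRange_one_eq_nil (by omega)
      rw [hnil, pvLoopA, pvFindW, dif_neg hb]

-- characterisations of the two scans of port B
lemma pvFindNeg_none_spec (fm : List Int) :
    ∀ (fuel i : Nat), fm.length - i ≤ fuel → pvFindNeg fm i = none →
      ∀ t, i ≤ t → t < fm.length → fm.getD t 0 ≠ -1 := by
  intro fuel
  induction fuel with
  | zero => intro i hfu h t ht1 ht2; omega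
  | succ fuel ih =>
    intro i hfu h t ht1 ht2
    have hi : i < fm.length := by omega
    rw [pvFindNeg, dif_pos hi] at h
    by_cases hv : fm.getD i 0 = -1
    · rw [if_pos hv] at h; simp at h
    · rw [if_neg hv] at h
      rcases Nat.eq_or_lt_of_le ht1 with he | hlt
      · subst he; exact hv
      · exact ih (i + 1) (by omega) h t (by omega) ht2

lemma pvFindNeg_some_spec (fm : List Int) :
    ∀ (fuel i s : Nat), fm.length - i ≤ fuel → pvFindNeg fm i = some s →
      fm.getD s 0 = -1 ∧ ∀ t, i ≤ t → t < s → fm.getD t 0 ≠ -1 := by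
  intro fuel
  induction fuel with
  | zero =>
    intro i s hfu h
    rw [pvFindNeg, dif_neg (by omega)] at h
    simp at h
  | succ fuel ih =>
    intro i s hfu h
    by_cases hi : i < fm.length
    · rw [pvFindNeg, dif_pos hi] at h
      by_cases hv : fm.getD i 0 = -1
      · rw [if_pos hv] at h
        injection h with h'
        subst h'
        exact ⟨hv, fun t ht1 ht2 => by omega⟩
      · rw [if_neg hv] at h
        have := ih (i + 1) s (by omega) h
        refine ⟨this.1, fun t ht1 ht2 => ?_⟩
        rcases Nat.eq_or_lt_of_le ht1 with he | hlt
        · subst he; exact hv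
        · exact this.2 t (by omega) ht2
    · rw [pvFindNeg, dif_neg hi] at h
      simp at h

lemma pvRunEnd_le (fm : List Int) :
    ∀ (fuel e : Nat), fm.length - e ≤ fuel → e ≤ fm.length → pvRunEnd fm e ≤ fm.length := by
  intro fuel
  induction fuel with
  | zero => intro e hfu he; rw [pvRunEnd, dif_neg (by omega)]; exact he
  | succ fuel ih =>
    intro e hfu he
    rw [pvRunEnd]
    by_cases hlt : e < fm.length
    · rw [dif_pos hlt]
      by_cases hv : fm.getD e 0 = -1
      · rw [if_pos hv]; exact ih (e + 1) (by omega) (by omega)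
      · rw [if_neg hv]; exact he
    · rw [dif_neg hlt]; exact he

lemma pvRunEnd_all (fm : List Int) :
    ∀ (fuel e : Nat), fm.length - e ≤ fuel →
      ∀ t, e ≤ t → t < pvRunEnd fm e → fm.getD t 0 = -1 := by
  intro fuel
  induction fuel with
  | zero =>
    intro e hfu t ht1 ht2
    rw [pvRunEnd, dif_neg (by omega)] at ht2
    omega
  | succ fuel ih =>
    intro e hfu t ht1 ht2
    rw [pvRunEnd] at ht2
    by_cases hlt : e < fm.length
    · rw [dif_pos hlt] at ht2
      by_cases hv : fm.getD e 0 = -1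
      · rw [if_pos hv] at ht2
        rcases Nat.eq_or_lt_of_le ht1 with he | hlt'
        · subst he; exact hv
        · exact ih (e + 1) (by omega) t (by omega) ht2
      · rw [if_neg hv] at ht2; omega
    · rw [dif_neg hlt] at ht2; omega

lemma pvRunEnd_stop (fm : List Int) :
    ∀ (fuel e : Nat), fm.length - e ≤ fuel →
      pvRunEnd fm e = fm.length ∨ fm.getD (pvRunEnd fm e) 0 ≠ -1 := by
  intro fuel
  induction fuel with
  | zero =>
    intro e hfu
    rw [pvRunEnd, dif_neg (by omega)]
    right
    rw [List.getD_eq_default _ _ (by omega)]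
    decide
  | succ fuel ih =>
    intro e hfu
    rw [pvRunEnd]
    by_cases hlt : e < fm.length
    · rw [dif_pos hlt]
      by_cases hv : fm.getD e 0 = -1
      · rw [if_pos hv]; exact ih (e + 1) (by omega)
      · rw [if_neg hv]; right; exact hv
    · rw [dif_neg hlt]
      rcases Nat.eq_or_lt_of_le (Nat.le_of_not_lt hlt) with he | he
      · left; omega
      · right
        rw [List.getD_eq_default _ _ (by omega)]
        decide

-- port B computes the first-window spec, from any starting point
lemma pvLoopB_spec (fm : List Int) (ss : Int) (hss : 1 ≤ ss) :
    ∀ (fuel i : Nat), fm.length + 1 - i ≤ fuel →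
      pvLoopB fm ss i = pvFindW fm ss.toNat i := by
  intro fuel
  induction fuel with
  | zero =>
    intro i hfu
    rw [pvLoopB.eq_def]
    split
    · rw [pvFindW, dif_neg (by omega)]
    · next start hfn =>
        have := pvFindNeg_bounds fm (fm.length - i) i start (by omega) hfn
        omega
  | succ fuel ih =>
    intro i hfu
    have hssn : (ss.toNat : Int) = ss := Int.toNat_of_nonneg (by omega)
    rw [pvLoopB.eq_def]
    split
    · next hfn =>
        refine (pvFindW_eq_neg_one (fm.length + 1) i (by omega) ?_).symm
        intro s hs hW
        have hsn : s < fm.length := by have := hW.1; omega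
        exact pvFindNeg_none_spec fm (fm.length - i) i (by omega) hfn s hs hsn
          (by simpa using hW.2 0 (by omega))
    · next start hfn =>
        have hb := pvFindNeg_bounds fm (fm.length - i) i start (by omega) hfn
        have hsp := pvFindNeg_some_spec fm (fm.length - i) i start (by omega) hfn
        have hge := pvRunEnd_ge fm (fm.length - start) start (by omega)
        have hle := pvRunEnd_le fm (fm.length - start) start (by omega) (by omega)
        have hall := pvRunEnd_all fm (fm.length - start) start (by omega)
        have hstop := pvRunEnd_stop fm (fm.length - start) start (by omega)
        have hpref : ∀ s, i ≤ s → s < start → ¬ pvW fm ss.toNat s := by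
          intro s hs1 hs2 hW
          exact hsp.2 s hs1 hs2 (by simpa using hW.2 0 (by omega))
        by_cases hgeb : ((pvRunEnd fm start : Int)) - (start : Int) ≥ ss
        · rw [if_pos hgeb]
          have hW : pvW fm ss.toNat start := by
            refine ⟨by omega, fun j hj => ?_⟩
            exact hall (start + j) (by omega) (by omega)
          rw [pvFindW_congr hb.1 hpref, pvFindW_of_W hW]
        · rw [if_neg hgeb]
          rw [ih (pvRunEnd fm start + 1) (by omega)]
          refine (pvFindW_congr (by omega) ?_).symm
          intro s hs1 hs2 hW
          rcases Nat.lt_or_ge s start with hslt | hsge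
          · exact hpref s hs1 hslt hW
          · rcases Nat.lt_or_ge (s + ss.toNat) (pvRunEnd fm start + 1) with hin | hout
            · -- the whole window sits inside the run: the run would be long enough
              omega
            · -- the window covers cell pvRunEnd fm start, which is not -1 (or past the end)
              have hj : pvRunEnd fm start - s < ss.toNat := by omega
              have hv := hW.2 _ hj
              rw [show s + (pvRunEnd fm start - s) = pvRunEnd fm start by omega] at hv
              rcases hstop with h | h
              · have := hW.1; omega
              · exact h hv

-- ===== VERDICT (by name: the statement is the Claim_ definition above) =====
theorem get_space_index_spec : Claim_equal_get_space_index := by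
  intro fm ss hdom hpre
  unfold Spec_get_space_index
  have hss : 1 ≤ ss := hpre
  have hA : get_space_index fm ss = pvFindW fm ss.toNat 0 := by
    unfold get_space_index
    have := pvLoopA_spec fm ss hss (fm.length + 1) 0 (by omega)
    simpa using this
  have hB : get_space_index_alt fm ss = pvFindW fm ss.toNat 0 := by
    unfold get_space_index_alt
    exact pvLoopB_spec fm ss hss (fm.length + 1) 0 (by omega)
  rw [hA, hB]
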